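-- pv_equiv track=rewrite | github.com/microsoft/cliffordlayers | cliffordlayers/basisbladeorder.py | canonical_reordering_sign
-- ===== SOURCE A (Python) =====
-- def set_bit_indices(x: int):
--     """Iterate over the indices of bits set to 1 in `x`, in ascending order"""
--     n = 0
--     while x > 0:
--         if x & 1:
--             yield n
--         x = x >> 1
--         n = n + 1
--
-- def count_set_bits(bitmap: int) -> int:
--     """Counts the number of bits set to 1 in bitmap"""
--     count = 0
--     for i in set_bit_indices(bitmap):
--         count += 1
--     return count
--
-- def canonical_reordering_sign_euclidean(bitmap_a, bitmap_b):
--     """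
--     Computes the sign for the product of bitmap_a and bitmap_b
--     assuming a euclidean metric
--     """
--     a = bitmap_a >> 1
--     sum_value = 0
--     while a != 0:
--         sum_value = sum_value + count_set_bits(a & bitmap_b)
--         a = a >> 1
--     if (sum_value & 1) == 0:
--         return 1
--     else:
--         return -1
--
-- def canonical_reordering_sign(bitmap_a, bitmap_b, metric):
--     """
--     Computes the sign for the product of bitmap_a and bitmap_b
--     given the supplied metric
--     """
--     bitmap = bitmap_a & bitmap_b
--     output_sign = canonical_reordering_sign_euclidean(bitmap_a, bitmap_b)
--     i = 0
--     while bitmap != 0: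
--         if (bitmap & 1) != 0:
--             output_sign *= metric[i]
--         i = i + 1
--         bitmap = bitmap >> 1
--     return output_sign
-- ===== SOURCE B (Python) =====
-- def canonical_reordering_sign(bitmap_a, bitmap_b, metric):
--     """
--     Computes the sign for the product of bitmap_a and bitmap_b
--     given the supplied metric, in a single pass over the bits.
--     """
--     a, b = bitmap_a, bitmap_b
--     swaps = 0       # number of basis-vector transpositions needed
--     below = 0       # set bits of bitmap_b strictly below the current index
--     sign = 1
--     i = 0
--     while a != 0:
--         if a & 1:
--             swaps += below
--             if b & 1:
--                 sign *= metric[i]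
--         below += b & 1
--         a >>= 1
--         b >>= 1
--         i += 1
--     return -sign if swaps & 1 else sign
-- ===== Notes on version B (the rewrite author's own statement) =====
-- stated objective: alternative
-- what changed: Replaces A's nested loops (re-popcounting a&b for every shift of a, plus a separate metric loop) by a single pass over the bits that keeps a running count of b's bits below the current index and folds the metric product into the same loop; O(w) bit steps instead of O(w^2), though on 32-bit-bounded inputs a timing run did not confirm a 1.5x win.
import Mathlib
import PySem

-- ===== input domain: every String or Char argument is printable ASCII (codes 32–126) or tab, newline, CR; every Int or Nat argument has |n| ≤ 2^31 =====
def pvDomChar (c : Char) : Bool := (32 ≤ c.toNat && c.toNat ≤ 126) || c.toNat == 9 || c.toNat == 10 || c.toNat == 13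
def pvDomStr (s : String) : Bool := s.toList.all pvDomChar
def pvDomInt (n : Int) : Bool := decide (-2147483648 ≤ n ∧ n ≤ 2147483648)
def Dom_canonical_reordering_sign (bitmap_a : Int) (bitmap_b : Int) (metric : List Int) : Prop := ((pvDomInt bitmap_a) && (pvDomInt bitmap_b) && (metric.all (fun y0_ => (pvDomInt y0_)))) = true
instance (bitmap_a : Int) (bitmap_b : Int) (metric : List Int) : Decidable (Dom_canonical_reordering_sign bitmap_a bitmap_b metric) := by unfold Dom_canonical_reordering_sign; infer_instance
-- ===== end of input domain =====

-- B replaces A's nested bit loops (a fresh popcount of a&b for every shift of a, plus a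
-- separate metric loop) by one pass over the bits of bitmap_a that keeps a running count of
-- bitmap_b's lower bits and folds the metric product into the same loop (objective: alternative,
-- O(w) bit steps instead of O(w^2); not measurably faster on the 32-bit inputs timed).


-- termination helper, cited by the ports' decreasing_by
theorem pvShiftRightOneToNatLt (x : Int) (h : 0 < x) : (x >>> (1 : Nat)).toNat < x.toNat := by
  rcases x with n | n
  · have hn : 0 < n := by simpa using h
    show n >>> 1 < n
    rw [Nat.shiftRight_one]
    omega
  · omega

-- ===== PORT A =====
-- count_set_bits(x): iterate set_bit_indices (while x > 0), counting the yielded indices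
def pvCountBitsLoop (x : Int) (count : Int) : Int :=
  if h : 0 < x then
    pvCountBitsLoop (x >>> (1:Nat)) (count + if PySem.Int.band x 1 ≠ 0 then 1 else 0)
  else count
termination_by x.toNat
decreasing_by exact pvShiftRightOneToNatLt x h

-- 'while a != 0' of canonical_reordering_sign_euclidean; for a < 0 Python loops forever
-- (excluded by Pre_), the port's 0 < a guard stops there
def pvEuclidLoop (a : Int) (b : Int) (sum_value : Int) : Int :=
  if h : 0 < a then
    pvEuclidLoop (a >>> (1:Nat)) b (sum_value + pvCountBitsLoop (PySem.Int.band a b) 0)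
  else sum_value
termination_by a.toNat
decreasing_by exact pvShiftRightOneToNatLt a h

def canonical_reordering_sign_euclidean (bitmap_a : Int) (bitmap_b : Int) : Int :=
  let sum_value := pvEuclidLoop (bitmap_a >>> (1:Nat)) bitmap_b 0
  if PySem.Int.band sum_value 1 = 0 then 1 else -1

-- 'while bitmap != 0' of canonical_reordering_sign; for bitmap < 0 Python loops forever
-- (excluded by Pre_); metric[i] raises IndexError out of range (excluded by Pre_) — the
-- port uses .getD 0 there
def pvMetricLoop (bitmap : Int) (metric : List Int) (output_sign : Int) (i : Int) : Int :=
  if h : 0 < bitmap then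
    pvMetricLoop (bitmap >>> (1:Nat)) metric
      (if PySem.Int.band bitmap 1 ≠ 0 then output_sign * (PySem.List.pyGet? metric i).getD 0
       else output_sign)
      (i + 1)
  else output_sign
termination_by bitmap.toNat
decreasing_by exact pvShiftRightOneToNatLt bitmap h

def canonical_reordering_sign (bitmap_a : Int) (bitmap_b : Int) (metric : List Int) : Int :=
  let bitmap := PySem.Int.band bitmap_a bitmap_b
  let output_sign := canonical_reordering_sign_euclidean bitmap_a bitmap_b
  pvMetricLoop bitmap metric output_sign 0

-- ===== PORT B =====
-- Source B's single 'while a != 0' loop; for a < 0 Python loops forever (excluded by Pre_),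
-- the port's 0 < a guard stops there; metric[i] as in port A
def pvAltLoop (a : Int) (b : Int) (swaps : Int) (below : Int) (sign : Int) (i : Int)
    (metric : List Int) : Int :=
  if h : 0 < a then
    pvAltLoop (a >>> (1:Nat)) (b >>> (1:Nat))
      (if PySem.Int.band a 1 ≠ 0 then swaps + below else swaps)
      (below + PySem.Int.band b 1)
      (if PySem.Int.band a 1 ≠ 0 ∧ PySem.Int.band b 1 ≠ 0 then
         sign * (PySem.List.pyGet? metric i).getD 0
       else sign)
      (i + 1) metric
  else if PySem.Int.band swaps 1 ≠ 0 then -sign else sign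
termination_by a.toNat
decreasing_by exact pvShiftRightOneToNatLt a h

def canonical_reordering_sign_alt (bitmap_a : Int) (bitmap_b : Int) (metric : List Int) : Int :=
  pvAltLoop bitmap_a bitmap_b 0 0 1 0 metric

-- ===== PRECONDITION & SPEC =====
-- Pre_ excludes exactly where Python A does not return normally: bitmap_a < 0 makes both of
-- A's while-loops run forever, and a common set bit at an index ≥ len(metric) makes
-- metric[i] raise IndexError (the common bits are the bits of bitmap_a & bitmap_b, which is
-- ≥ 0 and < 2^len(metric) iff they all lie below len(metric)).
def Pre_canonical_reordering_sign (bitmap_a : Int) (bitmap_b : Int) (metric : List Int) : Prop :=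
  0 ≤ bitmap_a ∧ PySem.Int.band bitmap_a bitmap_b < 2 ^ metric.length
instance (bitmap_a : Int) (bitmap_b : Int) (metric : List Int) : Decidable (Pre_canonical_reordering_sign bitmap_a bitmap_b metric) := by unfold Pre_canonical_reordering_sign; infer_instance
def pvWitness_canonical_reordering_sign : Int × Int × List Int := (5, 3, [1, 1])

def Spec_canonical_reordering_sign (bitmap_a : Int) (bitmap_b : Int) (metric : List Int) (out : Int) : Prop := out = canonical_reordering_sign_alt bitmap_a bitmap_b metric
instance (bitmap_a : Int) (bitmap_b : Int) (metric : List Int) (out : Int) : Decidable (Spec_canonical_reordering_sign bitmap_a bitmap_b metric out) := by unfold Spec_canonical_reordering_sign; infer_instance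

-- ===== CLAIM (what is proved, stated in full; the proofs are below) =====
def Claim_equal_canonical_reordering_sign : Prop := ∀ (bitmap_a : Int) (bitmap_b : Int) (metric : List Int), Dom_canonical_reordering_sign bitmap_a bitmap_b metric → Pre_canonical_reordering_sign bitmap_a bitmap_b metric → Spec_canonical_reordering_sign bitmap_a bitmap_b metric (canonical_reordering_sign bitmap_a bitmap_b metric)

-- ===== LEMMAS AND PROOFS =====

-- basic bit facts
theorem pv_nat_and_mod_two (x y : Nat) : (x &&& y) % 2 = x % 2 * (y % 2) := by
  have h := Nat.testBit_and x y 0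
  simp only [Nat.testBit_zero] at h
  have hh : (x &&& y) % 2 = 1 ↔ (x % 2 = 1 ∧ y % 2 = 1) := by
    constructor
    · intro hx
      have : (decide (x % 2 = 1) && decide (y % 2 = 1)) = true := by rw [← h, hx]; simp
      simpa using this
    · intro ⟨hx, hy⟩
      have : decide ((x &&& y) % 2 = 1) = true := by rw [h, hx, hy]; simp
      simpa using this
  have h1 : x % 2 = 0 ∨ x % 2 = 1 := by omega
  have h2 : y % 2 = 0 ∨ y % 2 = 1 := by omega
  rcases h1 with h1 | h1 <;> rcases h2 with h2 | h2 <;> rw [h1, h2] <;> omega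

theorem pv_band_nn (n m : Nat) : PySem.Int.band (Int.ofNat n) (Int.ofNat m) = Int.ofNat (n &&& m) := by
  simp [PySem.Int.band]

theorem pv_band_ns (n m : Nat) : PySem.Int.band (Int.ofNat n) (Int.negSucc m) = Int.ofNat (n - (n &&& m)) := by
  simp [PySem.Int.band]

theorem pv_sr_nn (n : Nat) : (Int.ofNat n) >>> (1:Nat) = Int.ofNat (n >>> 1) := rfl
theorem pv_sr_ns (m : Nat) : (Int.negSucc m) >>> (1:Nat) = Int.negSucc (m >>> 1) := rfl

theorem pv_band_half (a b : Int) (ha : 0 ≤ a) :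
    (PySem.Int.band a b) >>> (1:Nat) = PySem.Int.band (a >>> (1:Nat)) (b >>> (1:Nat)) := by
  rcases a with n | n
  · rcases b with m | m
    · rw [pv_band_nn, pv_sr_nn, pv_sr_nn, pv_sr_nn, pv_band_nn, Nat.shiftRight_and_distrib]
    · rw [pv_band_ns, pv_sr_nn, pv_sr_nn, pv_sr_ns, pv_band_ns]
      have hle : (n &&& m) ≤ n := Nat.and_le_left
      have hm2 : (n &&& m) % 2 = n % 2 * (m % 2) := pv_nat_and_mod_two n m
      have hb : m % 2 = 0 ∨ m % 2 = 1 := by omega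
      have hdist : (n &&& m) >>> 1 = (n >>> 1) &&& (m >>> 1) := Nat.shiftRight_and_distrib
      congr 1
      rw [← hdist]
      simp only [Nat.shiftRight_one] at *
      rcases hb with hb | hb <;> rw [hb] at hm2 <;> omega
  · exact absurd ha (by simp)

theorem pv_band1_eq_mod2 (x : Int) : PySem.Int.band x 1 = x % 2 := by
  rw [PySem.Int.band_one, PySem.Int.mod_eq_emod_of_pos (by norm_num)]

theorem pv_band_bit0 (a b : Int) (ha : 0 ≤ a) :
    PySem.Int.band (PySem.Int.band a b) 1 = PySem.Int.band a 1 * PySem.Int.band b 1 := by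
  rw [pv_band1_eq_mod2, pv_band1_eq_mod2, pv_band1_eq_mod2]
  rcases a with n | n
  · have hn : n % 2 = 0 ∨ n % 2 = 1 := by omega
    have hb2 : ∀ m : Nat, m % 2 = 0 ∨ m % 2 = 1 := fun m => by omega
    rcases b with m | m
    · rw [pv_band_nn]
      have hm2 : (n &&& m) % 2 = n % 2 * (m % 2) := pv_nat_and_mod_two n m
      show (((n &&& m : Nat) : Int)) % 2 = ((n : Int)) % 2 * (((m : Nat) : Int) % 2)
      have hgn : ((n : Int)) % 2 = ((n % 2 : Nat) : Int) := by omega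
      have hgm : (((m : Nat) : Int)) % 2 = ((m % 2 : Nat) : Int) := by omega
      rw [hgn, hgm]
      rcases hn with hn | hn <;> rcases hb2 m with hb | hb <;>
        rw [hn, hb] at hm2 ⊢ <;> push_cast <;> omega
    · rw [pv_band_ns]
      have hm2 : (n &&& m) % 2 = n % 2 * (m % 2) := pv_nat_and_mod_two n m
      have hle : (n &&& m) ≤ n := Nat.and_le_left
      show (((n - (n &&& m) : Nat) : Int)) % 2 = ((n : Int)) % 2 * ((Int.negSucc m) % 2)
      have hgn : ((n : Int)) % 2 = ((n % 2 : Nat) : Int) := by omega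
      have hgm : ((Int.negSucc m)) % 2 = 1 - ((m % 2 : Nat) : Int) := by
        rw [Int.negSucc_eq]; omega
      rw [hgn, hgm]
      rcases hn with hn | hn <;> rcases hb2 m with hb | hb <;>
        rw [hn, hb] at hm2 ⊢ <;> push_cast <;> omega
  · exact absurd ha (by simp)

theorem pv_sr_nonneg (x : Int) (h : 0 ≤ x) : 0 ≤ x >>> (1 : Nat) := by
  rcases x with n | n
  · exact Int.ofNat_nonneg _
  · omega

theorem pvCountBitsLoop_acc (x c : Int) : pvCountBitsLoop x c = c + pvCountBitsLoop x 0 := by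
  rw [pvCountBitsLoop]
  conv_rhs => rw [pvCountBitsLoop]
  by_cases h : 0 < x
  · simp only [h, dite_true]
    rw [pvCountBitsLoop_acc (x >>> (1:Nat)) (c + _), pvCountBitsLoop_acc (x >>> (1:Nat)) (0 + _)]
    ring
  · simp [h]
termination_by x.toNat
decreasing_by all_goals exact pvShiftRightOneToNatLt _ (by assumption)

theorem pv_band1_cases (x : Int) : PySem.Int.band x 1 = 0 ∨ PySem.Int.band x 1 = 1 := by
  rw [pv_band1_eq_mod2]
  omega

theorem pv_pc_rec (x : Int) (h : 0 ≤ x) :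
    pvCountBitsLoop x 0 = PySem.Int.band x 1 + pvCountBitsLoop (x >>> (1:Nat)) 0 := by
  by_cases hx : 0 < x
  · rw [pvCountBitsLoop]
    simp only [hx, dite_true]
    rw [pvCountBitsLoop_acc]
    rcases pv_band1_cases x with hb | hb <;> simp [hb]
  · have hx0 : x = 0 := by omega
    subst hx0
    rw [show ((0:Int) >>> (1:Nat)) = 0 from rfl,
        show PySem.Int.band 0 1 = (0:Int) from by decide]
    simp

-- A's euclidean sum: accumulator form and the one-bit-of-b halving recursion
theorem pvEuclidLoop_acc (a b s : Int) : pvEuclidLoop a b s = s + pvEuclidLoop a b 0 := by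
  rw [pvEuclidLoop]
  conv_rhs => rw [pvEuclidLoop]
  by_cases h : 0 < a
  · simp only [h, dite_true]
    rw [pvEuclidLoop_acc (a >>> (1:Nat)) b (s + _), pvEuclidLoop_acc (a >>> (1:Nat)) b (0 + _)]
    ring
  · simp [h]
termination_by a.toNat
decreasing_by all_goals exact pvShiftRightOneToNatLt _ (by assumption)

theorem pvEuclidLoop_unfold (a b : Int) (ha : 0 ≤ a) :
    pvEuclidLoop a b 0 = pvCountBitsLoop (PySem.Int.band a b) 0 + pvEuclidLoop (a >>> (1:Nat)) b 0 := by
  by_cases h : 0 < a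
  · rw [pvEuclidLoop]
    simp only [h, dite_true]
    rw [pvEuclidLoop_acc]
    ring
  · have ha0 : a = 0 := by omega
    subst ha0
    rw [PySem.Int.band_comm, PySem.Int.band_zero,
        show ((0:Int) >>> (1:Nat)) = 0 from rfl,
        show pvCountBitsLoop 0 0 = (0:Int) from by rw [pvCountBitsLoop]; simp]
    simp

theorem pvEuclidLoop_rec (a b : Int) (ha : 0 ≤ a) :
    pvEuclidLoop a b 0
      = PySem.Int.band b 1 * pvCountBitsLoop a 0 + pvEuclidLoop (a >>> (1:Nat)) (b >>> (1:Nat)) 0 := by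
  by_cases h : 0 < a
  · have ha1 : 0 ≤ a >>> (1:Nat) := pv_sr_nonneg a ha
    have hab : 0 ≤ PySem.Int.band a b := PySem.Int.band_nonneg_of_nonneg_left b ha
    rw [pvEuclidLoop_unfold a b ha, pvEuclidLoop_rec (a >>> (1:Nat)) b ha1,
        pvEuclidLoop_unfold (a >>> (1:Nat)) (b >>> (1:Nat)) ha1,
        pv_pc_rec (PySem.Int.band a b) hab, pv_band_bit0 a b ha, pv_band_half a b ha,
        pv_pc_rec a ha]
    ring
  · have ha0 : a = 0 := by omega
    subst ha0
    rw [show ((0:Int) >>> (1:Nat)) = 0 from rfl,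
        show pvCountBitsLoop 0 0 = (0:Int) from by rw [pvCountBitsLoop]; simp,
        show pvEuclidLoop 0 (b >>> (1:Nat)) 0 = (0:Int) from by rw [pvEuclidLoop]; simp,
        show pvEuclidLoop 0 b 0 = (0:Int) from by rw [pvEuclidLoop]; simp]
    ring
termination_by a.toNat
decreasing_by all_goals exact pvShiftRightOneToNatLt _ (by assumption)

-- A's metric loop: multiplicative accumulator
theorem pvMetricLoop_acc (c : Int) (metric : List Int) (s i : Int) :
    pvMetricLoop c metric s i = s * pvMetricLoop c metric 1 i := by
  rw [pvMetricLoop]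
  conv_rhs => rw [pvMetricLoop]
  by_cases h : 0 < c
  · simp only [h, dite_true]
    split_ifs with hc
    · rw [pvMetricLoop_acc (c >>> (1:Nat)) metric (s * _)]
      conv_rhs => rw [pvMetricLoop_acc (c >>> (1:Nat)) metric (1 * _)]
      ring
    · rw [pvMetricLoop_acc (c >>> (1:Nat)) metric s]
  · simp [h]
termination_by c.toNat
decreasing_by all_goals exact pvShiftRightOneToNatLt _ (by assumption)

-- B-shaped metric product (proof-side only)
def pvMprod (a b : Int) (metric : List Int) (i : Int) : Int :=
  if h : 0 < a then
    (if PySem.Int.band a 1 ≠ 0 ∧ PySem.Int.band b 1 ≠ 0 then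
       (PySem.List.pyGet? metric i).getD 0 else 1) * pvMprod (a >>> (1:Nat)) (b >>> (1:Nat)) metric (i + 1)
  else 1
termination_by a.toNat
decreasing_by exact pvShiftRightOneToNatLt a h

theorem pvMprod_of_band_zero (a b : Int) (metric : List Int) (i : Int) (ha : 0 ≤ a)
    (h : PySem.Int.band a b = 0) : pvMprod a b metric i = 1 := by
  rw [pvMprod]
  by_cases h0 : 0 < a
  · simp only [h0, dite_true]
    have hb0 := pv_band_bit0 a b ha
    rw [h, show PySem.Int.band 0 1 = (0:Int) from by decide] at hb0
    have hcond : ¬ (PySem.Int.band a 1 ≠ 0 ∧ PySem.Int.band b 1 ≠ 0) := by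
      rcases mul_eq_zero.mp hb0.symm with h1 | h1 <;> tauto
    have hsh : PySem.Int.band (a >>> (1:Nat)) (b >>> (1:Nat)) = 0 := by
      rw [← pv_band_half a b ha, h]; rfl
    rw [if_neg hcond, pvMprod_of_band_zero (a >>> (1:Nat)) (b >>> (1:Nat)) metric (i + 1)
          (pv_sr_nonneg a ha) hsh]
    ring
  · simp [h0]
termination_by a.toNat
decreasing_by all_goals exact pvShiftRightOneToNatLt _ (by assumption)

theorem pvMprod_eq_metricLoop (a b : Int) (metric : List Int) (i : Int) (ha : 0 ≤ a) :
    pvMprod a b metric i = pvMetricLoop (PySem.Int.band a b) metric 1 i := by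
  by_cases h0 : 0 < a
  · by_cases hz : PySem.Int.band a b = 0
    · rw [hz, pvMprod_of_band_zero a b metric i ha hz, pvMetricLoop]
      simp
    · have hab : 0 ≤ PySem.Int.band a b := PySem.Int.band_nonneg_of_nonneg_left b ha
      have hpos : 0 < PySem.Int.band a b := by omega
      rw [pvMprod]
      simp only [h0, dite_true]
      rw [pvMetricLoop]
      simp only [hpos, dite_true]
      rw [pv_band_half a b ha, pv_band_bit0 a b ha,
          pvMprod_eq_metricLoop (a >>> (1:Nat)) (b >>> (1:Nat)) metric (i + 1) (pv_sr_nonneg a ha)]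
      have hiff : (PySem.Int.band a 1 * PySem.Int.band b 1 ≠ 0)
          ↔ (PySem.Int.band a 1 ≠ 0 ∧ PySem.Int.band b 1 ≠ 0) := mul_ne_zero_iff
      split_ifs with h1 h2 h2
      · rw [pvMetricLoop_acc _ metric (1 * _)]
        ring
      · exact absurd (hiff.mpr h1) h2
      · exact absurd (hiff.mp h2) h1
      · rw [pvMetricLoop_acc _ metric 1]
        ring
  · have ha0 : a = 0 := by omega
    subst ha0
    rw [PySem.Int.band_comm, PySem.Int.band_zero, pvMprod, pvMetricLoop]
    simp
termination_by a.toNat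
decreasing_by all_goals exact pvShiftRightOneToNatLt _ (by assumption)

-- B's loop invariant
theorem pvAltLoop_inv (a b swaps below sign i : Int) (metric : List Int) (ha : 0 ≤ a) :
    pvAltLoop a b swaps below sign i metric
      = if PySem.Int.band
            (swaps + below * pvCountBitsLoop a 0 + pvEuclidLoop (a >>> (1:Nat)) b 0) 1 ≠ 0 then
          -(sign * pvMprod a b metric i)
        else sign * pvMprod a b metric i := by
  by_cases h0 : 0 < a
  · have ha1 : 0 ≤ a >>> (1:Nat) := pv_sr_nonneg a ha
    rw [pvAltLoop]
    simp only [h0, dite_true]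
    rw [pvAltLoop_inv (a >>> (1:Nat)) (b >>> (1:Nat)) _ _ _ _ metric ha1]
    have hpar : (if PySem.Int.band a 1 ≠ 0 then swaps + below else swaps)
          + (below + PySem.Int.band b 1) * pvCountBitsLoop (a >>> (1:Nat)) 0
          + pvEuclidLoop ((a >>> (1:Nat)) >>> (1:Nat)) (b >>> (1:Nat)) 0
        = swaps + below * pvCountBitsLoop a 0 + pvEuclidLoop (a >>> (1:Nat)) b 0 := by
      rw [pv_pc_rec a ha, pvEuclidLoop_rec (a >>> (1:Nat)) b ha1]
      rcases pv_band1_cases a with h1 | h1 <;> rw [h1] <;> simp <;> ring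
    rw [hpar]
    have hmp : pvMprod a b metric i
        = (if PySem.Int.band a 1 ≠ 0 ∧ PySem.Int.band b 1 ≠ 0 then
             (PySem.List.pyGet? metric i).getD 0 else 1)
          * pvMprod (a >>> (1:Nat)) (b >>> (1:Nat)) metric (i + 1) := by
      rw [pvMprod]
      simp only [h0, dite_true]
    rw [hmp]
    split_ifs with hpar1 hc hc <;> ring
  · have ha0 : a = 0 := by omega
    subst ha0
    rw [pvAltLoop]
    simp only [show ¬ (0:Int) < 0 from by omega, dite_false]
    rw [show ((0:Int) >>> (1:Nat)) = 0 from rfl,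
        show pvCountBitsLoop 0 0 = (0:Int) from by rw [pvCountBitsLoop]; simp,
        show pvEuclidLoop 0 b 0 = (0:Int) from by rw [pvEuclidLoop]; simp,
        show pvMprod 0 b metric i = (1:Int) from by rw [pvMprod]; simp]
    rw [show swaps + below * 0 + 0 = swaps from by ring]
    split_ifs with h1 <;> ring
termination_by a.toNat
decreasing_by all_goals exact pvShiftRightOneToNatLt _ (by assumption)

-- ===== VERDICT (by name: the statement is the Claim_ definition above) =====
theorem canonical_reordering_sign_spec : Claim_equal_canonical_reordering_sign := by
  intro a b metric _ hpre
  obtain ⟨ha, -⟩ := hpre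
  unfold Spec_canonical_reordering_sign
  unfold canonical_reordering_sign canonical_reordering_sign_alt
    canonical_reordering_sign_euclidean
  simp only []
  rw [pvAltLoop_inv a b 0 0 1 0 metric ha,
      pvMprod_eq_metricLoop a b metric 0 ha,
      pvMetricLoop_acc (PySem.Int.band a b) metric _ 0,
      show (0:Int) + 0 * pvCountBitsLoop a 0 + pvEuclidLoop (a >>> (1:Nat)) b 0
         = pvEuclidLoop (a >>> (1:Nat)) b 0 from by ring]
  split_ifs with h1 h2 h2 <;> ring_nf <;> omega
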